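-- pv_equiv track=rewrite | github.com/Wangpeiyi9979/ESD | util/data_loader.py | __fewnerd_get_class_span_dict__
-- ===== SOURCE A (Python) =====
-- def __fewnerd_get_class_span_dict__(label):
--     '''
--     return a dictionary of each class label/tag corresponding to the entity positions in the sentence
--     {label:[(start_pos, end_pos), ...]}
--     from: https://github.com/thunlp/Few-NERD/blob/main/util/metric.py
--     '''
--     class_span = {}
--     current_label = None
--     i = 0
--     # having tags in string format ['O', 'O', 'person-xxx', ..]
--     while i < len(label):
--         if label[i] != 'O':
--             start = i
--             current_label = label[i]
--             i += 1
--             while i < len(label) and label[i] == current_label: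
--                 i += 1
--             if current_label in class_span:
--                 class_span[current_label].append((start, i))
--             else:
--                 class_span[current_label] = [(start, i)]
--         else:
--             i += 1
--     return class_span
-- ===== SOURCE B (Python) =====
-- def __fewnerd_get_class_span_dict__(label):
--     '''
--     {label: [(start_pos, end_pos), ...]} -- two passes: run-length encode, then
--     fold the runs with a running position counter.
--     '''
--     # pass 1: run-length encoding of the label sequence
--     runs = []
--     for x in label:
--         if runs and runs[-1][0] == x:
--             runs[-1] = (x, runs[-1][1] + 1)
--         else:
--             runs.append((x, 1))
--     # pass 2: turn each non-'O' run into a span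
--     class_span = {}
--     pos = 0
--     for key, n in runs:
--         if key != 'O':
--             class_span.setdefault(key, []).append((pos, pos + n))
--         pos += n
--     return class_span
-- ===== Notes on version B (the rewrite author's own statement) =====
-- stated objective: alternative
-- what changed: Replaces A's single index-driven scan with a nested look-ahead while-loop by two separate passes: first a run-length encoding of the label list, then a fold over the runs that turns each non-'O' run into a span while advancing a position counter.
import Mathlib
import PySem

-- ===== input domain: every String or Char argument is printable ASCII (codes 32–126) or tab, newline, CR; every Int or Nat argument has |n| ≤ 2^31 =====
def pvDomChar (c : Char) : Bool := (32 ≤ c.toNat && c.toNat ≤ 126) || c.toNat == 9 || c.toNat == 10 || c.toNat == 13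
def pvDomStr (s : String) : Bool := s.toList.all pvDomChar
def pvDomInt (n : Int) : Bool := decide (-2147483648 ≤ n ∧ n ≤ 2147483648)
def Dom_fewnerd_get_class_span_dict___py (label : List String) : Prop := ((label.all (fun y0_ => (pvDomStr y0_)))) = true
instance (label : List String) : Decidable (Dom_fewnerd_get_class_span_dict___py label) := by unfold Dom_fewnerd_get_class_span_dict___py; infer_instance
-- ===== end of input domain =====

-- B re-implements A as two passes (run-length encode, then fold the runs); same return value, no speed claim.

-- ===== PORT A =====
-- inner while: 'while i < len(label) and label[i] == current_label: i += 1', returns the final i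
def pvAInner (label : List String) (cur : String) (i : Nat) : Nat :=
  if h : i < label.length then
    if label[i] = cur then pvAInner label cur (i + 1) else i
  else i
termination_by label.length - i

theorem pvAInner_ge (label : List String) (cur : String) (i : Nat) :
    i ≤ pvAInner label cur i := by
  fun_induction pvAInner with
  | case1 i h heq ih => omega
  | case2 i h heq => omega
  | case3 i h => omega

-- outer while over i, threading the dict; Python spans are ints, hence the casts
def pvAOuter (label : List String) (d : PySem.Dict String (List (Int × Int))) (i : Nat) :
    PySem.Dict String (List (Int × Int)) :=
  if h : i < label.length then
    if hO : label[i] ≠ "O" then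
      let cur := label[i]
      let j := pvAInner label cur (i + 1)
      let d' := if d.contains cur
        then d.modify cur [] (· ++ [((i : Int), (j : Int))])      -- class_span[cur].append((start, i))
        else d.insert cur [((i : Int), (j : Int))]                -- class_span[cur] = [(start, i)]
      pvAOuter label d' j
    else pvAOuter label d (i + 1)
  else d
termination_by label.length - i
decreasing_by
  · have := pvAInner_ge label (label[i]) (i + 1); omega
  · omega

def fewnerd_get_class_span_dict___py (label : List String) : List (String × List (Int × Int)) :=
  (pvAOuter label PySem.Dict.empty 0).items

-- ===== PORT B =====
-- pass 1 of Source B: run-length encoding; the Python list appends/mutates at the END,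
-- ported as the standard reversed accumulator (newest run in front) reversed at the end
def pvRunsStep (acc : List (String × Nat)) (x : String) : List (String × Nat) :=
  match acc with
  | (y, n) :: rest => if y = x then (y, n + 1) :: rest else (x, 1) :: (y, n) :: rest
  | [] => [(x, 1)]

def pvRuns (label : List String) : List (String × Nat) :=
  (label.foldl pvRunsStep []).reverse

-- pass 2 of Source B: fold over the runs with state (class_span, pos);
-- 'class_span.setdefault(key, []).append(p)' is exactly 'insert key (getD key [] ++ [p])'
def pvBStep (st : PySem.Dict String (List (Int × Int)) × Int) (r : String × Nat) :
    PySem.Dict String (List (Int × Int)) × Int :=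
  if r.1 ≠ "O" then
    (st.1.insert r.1 (st.1.getD r.1 [] ++ [(st.2, st.2 + (r.2 : Int))]), st.2 + (r.2 : Int))
  else (st.1, st.2 + (r.2 : Int))

def fewnerd_get_class_span_dict___py_alt (label : List String) : List (String × List (Int × Int)) :=
  (((pvRuns label).foldl pvBStep (PySem.Dict.empty, 0)).1).items

-- ===== PRECONDITION & SPEC =====
def Spec_fewnerd_get_class_span_dict___py (label : List String) (out : List (String × List (Int × Int))) : Prop := out = fewnerd_get_class_span_dict___py_alt label
instance (label : List String) (out : List (String × List (Int × Int))) : Decidable (Spec_fewnerd_get_class_span_dict___py label out) := by unfold Spec_fewnerd_get_class_span_dict___py; infer_instance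

-- ===== CLAIM (what is proved, stated in full; the proofs are below) =====
def Claim_equal_fewnerd_get_class_span_dict___py : Prop := ∀ (label : List String), Dom_fewnerd_get_class_span_dict___py label → Spec_fewnerd_get_class_span_dict___py label (fewnerd_get_class_span_dict___py label)

-- ===== LEMMAS AND PROOFS =====

-- length of the leading run of `cur`
def pvCL (cur : String) : List String → Nat
  | [] => 0
  | x :: xs => if x = cur then pvCL cur xs + 1 else 0

-- common reference point: A's traversal phrased structurally on the list, with pos : Int
def pvSpec (d : PySem.Dict String (List (Int × Int))) (pos : Int) : List String →
    PySem.Dict String (List (Int × Int))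
  | [] => d
  | x :: xs =>
    if x ≠ "O" then
      let n : Nat := pvCL x xs + 1
      pvSpec (d.insert x (d.getD x [] ++ [(pos, pos + (n : Int))])) (pos + (n : Int))
        (xs.drop (pvCL x xs))
    else pvSpec d (pos + 1) xs
termination_by l => l.length
decreasing_by all_goals simp

-- the run-continuation of pvRunsStep's fold, and the runs of a list
def pvRC (y : String) (n : Nat) : List String → List (String × Nat)
  | [] => [(y, n)]
  | x :: xs => if y = x then pvRC y (n + 1) xs else (y, n) :: pvRC x 1 xs

def pvRunsOf : List String → List (String × Nat)
  | [] => []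
  | x :: xs => pvRC x 1 xs

theorem pvAInner_eq (label : List String) (cur : String) :
    ∀ (l : List String) (i : Nat), label.drop i = l →
      pvAInner label cur i = i + pvCL cur l := by
  intro l
  induction l with
  | nil =>
    intro i h
    have hlen : label.length ≤ i := by
      have := congrArg List.length h; simp at this; omega
    unfold pvAInner
    simp [pvCL, Nat.not_lt.mpr hlen]
  | cons x xs ih =>
    intro i h
    have hi : i < label.length := by
      by_contra hc
      rw [List.drop_eq_nil_of_le (by omega)] at h
      simp at h
    rw [List.drop_eq_getElem_cons hi] at h
    obtain ⟨hx, hxs⟩ := List.cons.injEq .. ▸ h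
    unfold pvAInner
    rw [dif_pos hi, hx]
    by_cases hc : x = cur
    · rw [if_pos hc, ih (i + 1) hxs]
      simp [pvCL, hc]; omega
    · rw [if_neg hc]
      simp [pvCL, hc]

theorem pvUpd_eq (d : PySem.Dict String (List (Int × Int))) (k : String) (p : Int × Int) :
    (if d.contains k then d.modify k [] (· ++ [p]) else d.insert k [p])
      = d.insert k (d.getD k [] ++ [p]) := by
  by_cases h : d.contains k
  · rw [if_pos h]; rfl
  · rw [if_neg h, PySem.Dict.getD_of_not_contains d _ (by simpa using h)]; simp

theorem pvAOuter_eq (label : List String) (i : Nat)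
    (d : PySem.Dict String (List (Int × Int))) :
    pvAOuter label d i = pvSpec d (i : Int) (label.drop i) := by
  fun_induction pvAOuter with
  | case1 d i h hO cur j d' ih =>
    rw [List.drop_eq_getElem_cons h]
    rw [pvSpec]
    rw [if_pos hO]
    have hj : j = i + 1 + pvCL label[i] (label.drop (i + 1)) :=
      pvAInner_eq label label[i] (label.drop (i + 1)) (i + 1) rfl
    have hdrop : (label.drop (i + 1)).drop (pvCL label[i] (label.drop (i + 1)))
        = label.drop j := by rw [List.drop_drop]; congr 1; omega
    have hd' : d' = d.insert label[i]
        (d.getD label[i] [] ++ [((i : Int), (i : Int) + ((pvCL label[i] (label.drop (i + 1)) + 1 : Nat) : Int))]) := by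
      rw [show ((i : Int) + ((pvCL label[i] (label.drop (i + 1)) + 1 : Nat) : Int)) = (j : Int) by omega]
      exact pvUpd_eq d label[i] ((i : Int), (j : Int))
    rw [ih, hd', hdrop]
    congr 1
    omega
  | case2 d i h hO ih =>
    rw [List.drop_eq_getElem_cons h, pvSpec]
    simp at hO
    rw [if_neg (by simp [hO])]
    rw [ih]
    congr 1
  | case3 d i h =>
    rw [List.drop_eq_nil_of_le (by omega), pvSpec]

theorem pvRC_decomp (y : String) : ∀ (l : List String) (n : Nat),
    pvRC y n l = (y, n + pvCL y l) :: pvRunsOf (l.drop (pvCL y l)) := by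
  intro l
  induction l with
  | nil => intro n; simp [pvRC, pvCL, pvRunsOf]
  | cons x xs ih =>
    intro n
    by_cases hc : x = y
    · subst hc
      rw [pvRC, if_pos rfl, ih (n + 1)]
      simp [pvCL]
      omega
    · rw [pvRC, if_neg (fun he => hc he.symm)]
      rw [show pvCL y (x :: xs) = 0 by simp [pvCL, hc]]
      simp [pvRunsOf]

-- stepping over a leading run of 'O' one element at a time is advancing pos by its length
theorem pvSpec_skipO : ∀ (l : List String) (d : PySem.Dict String (List (Int × Int))) (pos : Int),
    pvSpec d (pos + (pvCL "O" l : Int)) (l.drop (pvCL "O" l)) = pvSpec d pos l := by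
  intro l
  induction l with
  | nil => intro d pos; simp [pvCL]
  | cons x xs ih =>
    intro d pos
    by_cases hc : x = "O"
    · subst hc
      rw [show pvCL "O" ("O" :: xs) = pvCL "O" xs + 1 by simp [pvCL]]
      rw [List.drop_succ_cons]
      rw [show pos + ((pvCL "O" xs + 1 : Nat) : Int) = (pos + 1) + (pvCL "O" xs : Int) by push_cast; ring]
      rw [ih d (pos + 1)]
      rw [pvSpec]
      simp
    · rw [show pvCL "O" (x :: xs) = 0 by simp [pvCL, hc]]
      simp

theorem pvFoldRuns_aux : ∀ (N : Nat) (l : List String), l.length ≤ N →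
    ∀ (d : PySem.Dict String (List (Int × Int))) (pos : Int),
    ((pvRunsOf l).foldl pvBStep (d, pos)).1 = pvSpec d pos l := by
  intro N
  induction N with
  | zero =>
    intro l hl d pos
    rw [List.length_eq_zero_iff.mp (Nat.le_zero.mp hl)]
    simp [pvRunsOf, pvSpec]
  | succ N ih => ?_
  intro l hl d pos
  match l with
  | [] => simp [pvRunsOf, pvSpec]
  | x :: xs =>
    rw [show pvRunsOf (x :: xs) = pvRC x 1 xs from rfl, pvRC_decomp x xs 1]
    rw [List.foldl_cons]
    have hlen : (xs.drop (pvCL x xs)).length ≤ N := by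
      simp at hl ⊢; omega
    by_cases hc : x = "O"
    · subst hc
      rw [show pvBStep (d, pos) ("O", 1 + pvCL "O" xs) = (d, pos + ((1 + pvCL "O" xs : Nat) : Int)) by
        simp [pvBStep]]
      rw [ih _ hlen]
      rw [pvSpec, if_neg (by simp)]
      rw [show pos + ((1 + pvCL "O" xs : Nat) : Int) = (pos + 1) + (pvCL "O" xs : Int) by push_cast; ring]
      exact pvSpec_skipO xs d (pos + 1)

    · rw [show pvBStep (d, pos) (x, 1 + pvCL x xs)
          = (d.insert x (d.getD x [] ++ [(pos, pos + ((1 + pvCL x xs : Nat) : Int))]),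
             pos + ((1 + pvCL x xs : Nat) : Int)) by simp [pvBStep, hc]]
      rw [ih _ hlen]
      rw [pvSpec, if_pos (by simp [hc])]
      simp only [Nat.add_comm 1 (pvCL x xs)]

theorem pvFoldRuns_eq (l : List String) (d : PySem.Dict String (List (Int × Int))) (pos : Int) :
    ((pvRunsOf l).foldl pvBStep (d, pos)).1 = pvSpec d pos l :=
  pvFoldRuns_aux l.length l le_rfl d pos

theorem pvFoldStep_acc : ∀ (l : List String) (y : String) (n : Nat) (acc : List (String × Nat)),
    l.foldl pvRunsStep ((y, n) :: acc) = (pvRC y n l).reverse ++ acc := by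
  intro l
  induction l with
  | nil => intro y n acc; simp [pvRC]
  | cons x xs ih =>
    intro y n acc
    rw [List.foldl_cons]
    by_cases hc : y = x
    · rw [show pvRunsStep ((y, n) :: acc) x = (y, n + 1) :: acc by simp [pvRunsStep, hc]]
      rw [ih, pvRC, if_pos hc]
    · rw [show pvRunsStep ((y, n) :: acc) x = (x, 1) :: (y, n) :: acc by simp [pvRunsStep, hc]]
      rw [ih, pvRC, if_neg hc]
      simp

theorem pvRuns_eq_runsOf (l : List String) : pvRuns l = pvRunsOf l := by
  match l with
  | [] => rfl
  | x :: xs =>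
    unfold pvRuns
    rw [List.foldl_cons, show pvRunsStep [] x = [(x, 1)] from rfl, pvFoldStep_acc]
    simp [pvRunsOf]

-- ===== VERDICT (by name: the statement is the Claim_ definition above) =====
theorem fewnerd_get_class_span_dict___py_spec : Claim_equal_fewnerd_get_class_span_dict___py := by
  intro label _
  unfold Spec_fewnerd_get_class_span_dict___py
  unfold fewnerd_get_class_span_dict___py fewnerd_get_class_span_dict___py_alt
  rw [pvRuns_eq_runsOf, pvFoldRuns_eq, pvAOuter_eq]
  simp
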